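-- pv_equiv track=rewrite | github.com/Hiron2305/ege_info_tutor | homework/300325/20.py | is_ladder
-- ===== SOURCE A (Python) =====
-- def is_ladder(sub):
--     if not sub:
--         return False
--
--     n = 1
--     i = 0
--     while i < len(sub):
--         char = sub[i]
--         if i + n > len(sub) or not all(sub[i + k] == char for k in range(n)):
--             return False
--         if n > 1 and char == sub[i - 1]:
--             return False
--         i += n
--         n += 1
--     return True
-- ===== SOURCE B (Python) =====
-- def is_ladder(sub):
--     # run-length encode sub, then the run lengths must be exactly 1, 2, ..., k
--     runs = []
--     i = 0
--     while i < len(sub):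
--         j = i
--         while j < len(sub) and sub[j] == sub[i]:
--             j += 1
--         runs.append(j - i)
--         i = j
--     return bool(runs) and runs == list(range(1, len(runs) + 1))
-- ===== Notes on version B (the rewrite author's own statement) =====
-- stated objective: simpler
-- what changed: B materializes the run-length encoding of the string in one pass and returns whether the run lengths equal [1, 2, ..., k], replacing A's incremental expected-block-length pointer bookkeeping with inner re-scans and an adjacent-character check.
import Mathlib
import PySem

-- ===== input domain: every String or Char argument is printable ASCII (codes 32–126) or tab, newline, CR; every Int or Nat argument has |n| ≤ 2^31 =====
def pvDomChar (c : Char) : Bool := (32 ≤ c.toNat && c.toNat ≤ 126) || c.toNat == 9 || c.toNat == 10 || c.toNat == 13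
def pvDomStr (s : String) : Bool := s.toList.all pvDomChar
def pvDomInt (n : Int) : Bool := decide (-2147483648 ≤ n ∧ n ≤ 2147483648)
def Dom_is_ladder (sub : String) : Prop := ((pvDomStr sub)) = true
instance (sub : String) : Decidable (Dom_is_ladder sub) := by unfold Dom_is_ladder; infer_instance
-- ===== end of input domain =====

-- B replaces A's incremental pointer/expected-block-length bookkeeping by run-length
-- encoding the string and comparing the run lengths to [1, 2, ..., k] (objective: simpler).

-- ===== PORT A =====
def loopA (l : List Char) (i n : Nat) : Bool :=
  if h : i < l.length then
    let char := l[i]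
    if decide (l.length < i + n) ||
        !((List.range n).all fun k => PySem.List.pyGet? l ((i : Int) + (k : Int)) == some char) then
      false
    else if decide (1 < n) && (PySem.List.pyGet? l ((i : Int) - 1) == some char) then
      false
    else loopA l (i + n) (n + 1)
  else true
termination_by 2 * (l.length - i) + (if n = 0 then 1 else 0)
decreasing_by
  rcases Nat.eq_zero_or_pos n with h0 | hp
  · simp [h0]
  · split <;> omega

def is_ladder (sub : String) : Bool :=
  let l := sub.toList
  if l.isEmpty then false else loopA l 0 1

-- ===== PORT B =====
def runLen (c : Char) : List Char → Nat
  | [] => 0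
  | x :: xs => if x == c then runLen c xs + 1 else 0

def runLens : List Char → List Nat
  | [] => []
  | c :: rest => (runLen c rest + 1) :: runLens (rest.drop (runLen c rest))
termination_by l => l.length
decreasing_by simp [List.length_drop]

def is_ladder_alt (sub : String) : Bool :=
  let runs := runLens sub.toList
  !runs.isEmpty && (runs == List.range' 1 runs.length)

-- ===== PRECONDITION & SPEC =====
def Spec_is_ladder (sub : String) (out : Bool) : Prop := out = is_ladder_alt sub
instance (sub : String) (out : Bool) : Decidable (Spec_is_ladder sub out) := by unfold Spec_is_ladder; infer_instance

-- ===== CLAIM (what is proved, stated in full; the proofs are below) =====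
def Claim_equal_is_ladder : Prop := ∀ (sub : String), Dom_is_ladder sub → Spec_is_ladder sub (is_ladder sub)

-- ===== LEMMAS AND PROOFS =====

-- the remaining-runs check of B, parameterised by the next expected run length n
def ref (l : List Char) (n : Nat) : Bool := runLens l == List.range' n (runLens l).length

theorem runLen_le (c : Char) (t : List Char) : runLen c t ≤ t.length := by
  induction t with
  | nil => simp [runLen]
  | cons x xs ih => simp only [runLen]; split <;> simp <;> omega

theorem getElem?_lt_runLen (c : Char) (t : List Char) (k : Nat) (hk : k < runLen c t) :
    t[k]? = some c := by
  induction t generalizing k with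
  | nil => simp [runLen] at hk
  | cons x xs ih =>
    by_cases hx : x = c
    · cases k with
      | zero => simp [hx]
      | succ k =>
        simp only [List.getElem?_cons_succ]
        exact ih k (by simp [runLen, hx] at hk; omega)
    · simp [runLen, hx] at hk

theorem getElem?_runLen (c : Char) (t : List Char) : t[runLen c t]? ≠ some c := by
  induction t with
  | nil => simp
  | cons x xs ih =>
    by_cases hx : x = c
    · simpa [runLen, hx] using ih
    · simpa [runLen, hx] using hx

theorem runLen_eq_zero (c : Char) (t : List Char) (h : t.head? ≠ some c) : runLen c t = 0 := by
  cases t with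
  | nil => rfl
  | cons x xs =>
    have hx : ¬ x = c := fun hx => h (by simp [hx])
    simp [runLen, hx]

theorem ref_nil (n : Nat) : ref [] n = true := by
  rw [ref, runLens]; rfl

theorem ref_cons (c : Char) (rest : List Char) (n : Nat) :
    ref (c :: rest) n =
      (decide (runLen c rest + 1 = n) && ref (rest.drop (runLen c rest)) (n + 1)) := by
  apply Bool.eq_iff_iff.mpr
  rw [ref, runLens, ref]
  simp [List.range'_succ]

theorem loopA_step (l : List Char) (i n : Nat) (h : i < l.length) :
    loopA l i n =
      (if (decide (l.length < i + n) ||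
          !((List.range n).all fun k => PySem.List.pyGet? l ((i : Int) + (k : Int)) == some (l[i]'h))) then
        false
      else if (decide (1 < n) && (PySem.List.pyGet? l ((i : Int) - 1) == some (l[i]'h))) then
        false
      else loopA l (i + n) (n + 1)) := by
  rw [loopA, dif_pos h]

theorem loopA_none (l : List Char) (i n : Nat) (h : ¬ i < l.length) : loopA l i n = true := by
  rw [loopA, dif_neg h]

theorem loopA_eq (k : Nat) : ∀ (l : List Char) (i n : Nat), l.length - i ≤ k → 2 ≤ n →
    1 ≤ i → i ≤ l.length →
    loopA l i n = (decide ((l.drop i).head? ≠ (l.drop (i - 1)).head?) && ref (l.drop i) n) := by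
  induction k with
  | zero =>
    intro l i n hk hn hi hil
    have h1 : ¬ i < l.length := by omega
    have h2 : l.drop i = [] := by
      apply List.drop_eq_nil_of_le; omega
    have h3 : (l.drop (i - 1)).head? = l[i - 1]? := List.head?_drop
    have h4 : i - 1 < l.length := by omega
    rw [loopA_none l i n h1, h2, h3, List.getElem?_eq_getElem h4, ref_nil]
    simp
  | succ k ih =>
    intro l i n hk hn hi hil
    by_cases hlt : i < l.length
    swap
    · have h2 : l.drop i = [] := by
        apply List.drop_eq_nil_of_le; omega
      have h3 : (l.drop (i - 1)).head? = l[i - 1]? := List.head?_drop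
      have h4 : i - 1 < l.length := by omega
      rw [loopA_none l i n hlt, h2, h3, List.getElem?_eq_getElem h4, ref_nil]
      simp
    · rw [loopA_step l i n hlt]
      set c := l[i]'hlt with hc
      set t := l.drop (i + 1) with ht
      have hd : l.drop i = c :: t := by
        rw [ht, hc, List.drop_eq_getElem_cons hlt]
      set m : Nat := runLen c t with hm
      have hrun : runLen c (l.drop i) = m + 1 := by
        rw [hd, hm]; simp [runLen]
      have hlen_d : (l.drop i).length = l.length - i := by simp
      have hml : m + 1 ≤ l.length - i := by
        have := runLen_le c (l.drop i); rw [hrun, hlen_d] at this; exact this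
      -- first check of A ⟺ ¬ (n ≤ m + 1)
      have hget : ∀ j : Nat, PySem.List.pyGet? l ((i : Int) + (j : Int)) = (l.drop i)[j]? := by
        intro j
        have hcast : (i : Int) + (j : Int) = ((i + j : Nat) : Int) := by push_cast; ring
        rw [hcast, PySem.List.pyGet?_natCast, List.getElem?_drop]
      have hfirst : (decide (l.length < i + n) ||
          !((List.range n).all fun j => PySem.List.pyGet? l ((i : Int) + (j : Int)) == some c))
          = !decide (n ≤ m + 1) := by
        apply Bool.eq_iff_iff.mpr
        simp only [Bool.or_eq_true, Bool.not_eq_eq_eq_not, Bool.not_true, List.all_eq_false,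
          List.mem_range, decide_eq_true_eq, Bool.not_eq_true', decide_eq_false_iff_not, not_le]
        constructor
        · rintro (h | ⟨j, hj, hne⟩)
          · omega
          · rw [hget] at hne
            by_contra hnle
            have hj := getElem?_lt_runLen c (l.drop i) j (by rw [hrun]; omega)
            simp [hj] at hne
        · intro h
          right
          refine ⟨m + 1, by omega, ?_⟩
          rw [hget]
          have := getElem?_runLen c (l.drop i)
          rw [hrun] at this
          simpa using this
      rw [hfirst]
      by_cases hle : n ≤ m + 1
      swap
      · simp only [hle, decide_false, Bool.not_false, if_true]
        rw [hd, ref_cons, ← hm]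
        have hne : ¬ (m + 1 = n) := by omega
        simp [hne]
      · simp only [hle, decide_true, Bool.not_true, Bool.false_eq_true, if_false]
        have hprevc : (i : Int) - 1 = ((i - 1 : Nat) : Int) := by omega
        have hprevlt : i - 1 < l.length := by omega
        have hprev : PySem.List.pyGet? l ((i : Int) - 1) = some (l[i - 1]'hprevlt) := by
          rw [hprevc, PySem.List.pyGet?_natCast, List.getElem?_eq_getElem hprevlt]
        have hheadprev : (l.drop (i - 1)).head? = some (l[i - 1]'hprevlt) := by
          rw [List.head?_drop, List.getElem?_eq_getElem hprevlt]
      -- previous character cases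
        by_cases hpc : l[i - 1]'hprevlt = c
        · have hsnd : (decide (1 < n) && (PySem.List.pyGet? l ((i : Int) - 1) == some c)) = true := by
            rw [hprev, hpc]
            simp; omega
          rw [hsnd, if_pos rfl, hd, hheadprev, hpc]
          simp
        · have hsnd : (decide (1 < n) && (PySem.List.pyGet? l ((i : Int) - 1) == some c)) = false := by
            rw [hprev]
            simp [hpc]
          rw [hsnd]
          simp only [Bool.false_eq_true, if_false]
          have hbound : i + n ≤ l.length := by omega
          rw [ih l (i + n) (n + 1) (by omega) (by omega) (by omega) hbound]
          have hmid : (l.drop (i + n - 1)).head? = some c := by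
            rw [List.head?_drop]
            have he : i + n - 1 = i + (n - 1) := by omega
            rw [he, ← List.getElem?_drop]
            exact getElem?_lt_runLen c (l.drop i) (n - 1) (by rw [hrun]; omega)
          rw [hmid]
          have hdropn : l.drop (i + n) = t.drop (n - 1) := by
            have he : i + n = (i + 1) + (n - 1) := by omega
            rw [he, ← List.drop_drop, ← ht]
          rw [hd, ref_cons, ← hm]
          by_cases heq : n = m + 1
          · have hafter : (l.drop (i + n)).head? ≠ some c := by
              rw [List.head?_drop, ← List.getElem?_drop]
              have := getElem?_runLen c (l.drop i)
              rw [hrun, ← heq] at this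
              exact this
            have hdq : t.drop m = l.drop (i + n) := by
              rw [hdropn]; congr 1; omega
            rw [hdq]
            have hafter' : l[i + (m + 1)]? ≠ some c := by
              rw [← List.head?_drop, ← heq]; exact hafter
            simp [heq, hafter', hheadprev, Ne.symm hpc]
          · have hhead : (l.drop (i + n)).head? = some c := by
              rw [List.head?_drop, ← List.getElem?_drop]
              exact getElem?_lt_runLen c (l.drop i) n (by rw [hrun]; omega)
            have hne : ¬ (m + 1 = n) := by omega
            simp [hhead, hne]

theorem main_eq (l : List Char) :
    (if l.isEmpty then false else loopA l 0 1) =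
      (!(runLens l).isEmpty && (runLens l == List.range' 1 (runLens l).length)) := by
  cases l with
  | nil => rw [runLens]; rfl
  | cons c t =>
    have h0 : 0 < (c :: t).length := by simp
    rw [show (c :: t).isEmpty = false from rfl, loopA_step (c :: t) 0 1 h0]
    have hfirst : (decide ((c :: t).length < 0 + 1) ||
        !((List.range 1).all fun k =>
          PySem.List.pyGet? (c :: t) (((0 : Nat) : Int) + (k : Int)) == some ((c :: t)[0]'h0))) = false := by
      simp [List.range_one, PySem.List.pyGet?_zero_cons]
    rw [hfirst]
    simp only [Bool.false_eq_true, if_false, Nat.lt_irrefl, decide_false, Bool.false_and,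
      Bool.not_false]
    rw [loopA_eq (c :: t).length (c :: t) 1 2 (by omega) (by omega) (by omega) (by simp),
      runLens]
    have hd1 : (c :: t).drop 1 = t := rfl
    have hd0 : ((c :: t).drop 0).head? = some c := rfl
    rw [hd1, hd0]
    have hB : (((runLen c t + 1) :: runLens (t.drop (runLen c t))) ==
        List.range' 1 ((runLen c t + 1) :: runLens (t.drop (runLen c t))).length)
        = ref (c :: t) 1 := by
      rw [ref, runLens]
    simp only [List.isEmpty_cons, Bool.not_false, Bool.true_and]
    rw [hB, ref_cons]
    by_cases hh : t.head? = some c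
    · have hm1 : 1 ≤ runLen c t := by
        cases t with
        | nil => simp at hh
        | cons x xs =>
          simp only [List.head?_cons, Option.some.injEq] at hh
          simp [runLen, hh]
      have hne : ¬ (runLen c t = 0) := by omega
      simp [hh, hne]
    · have hm0 : runLen c t = 0 := runLen_eq_zero c t hh
      simp [hh, hm0]

-- ===== VERDICT (by name: the statement is the Claim_ definition above) =====
theorem is_ladder_spec : Claim_equal_is_ladder := by
  intro sub _
  unfold Spec_is_ladder is_ladder is_ladder_alt
  exact main_eq sub.toList
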